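-- pv_equiv track=rewrite | github.com/M4g-451/signal_processing | click_repairer.py | _find_regions
-- ===== SOURCE A (Python) =====
-- def _find_regions(mask):
--     """Convert a boolean mask to a list of (start, end) tuples."""
--     regions = []
--     in_region = False
--     start = 0
--     for i, val in enumerate(mask):
--         if val and not in_region:
--             start = i
--             in_region = True
--         elif not val and in_region:
--             regions.append((start, i))
--             in_region = False
--     if in_region:
--         regions.append((start, len(mask)))
--     return regions
-- ===== SOURCE B (Python) =====
-- def _find_regions(mask):
--     """Convert a boolean mask to a list of (start, end) tuples."""
--     regions = []
--     idx = 0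
--     n = len(mask)
--     while idx < n:
--         j = idx
--         key = bool(mask[idx])
--         while j < n and bool(mask[j]) == key:
--             j += 1
--         if key:
--             regions.append((idx, j))
--         idx = j
--     return regions
-- ===== Notes on version B (the rewrite author's own statement) =====
-- stated objective: alternative
-- what changed: Replaced the in_region-flag stateful element-by-element scan with a run-length grouping pass: an outer loop over runs that scans each maximal run of equal truthiness with an inner pointer and emits (start-of-run, end-of-run) for true runs.
import Mathlib
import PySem

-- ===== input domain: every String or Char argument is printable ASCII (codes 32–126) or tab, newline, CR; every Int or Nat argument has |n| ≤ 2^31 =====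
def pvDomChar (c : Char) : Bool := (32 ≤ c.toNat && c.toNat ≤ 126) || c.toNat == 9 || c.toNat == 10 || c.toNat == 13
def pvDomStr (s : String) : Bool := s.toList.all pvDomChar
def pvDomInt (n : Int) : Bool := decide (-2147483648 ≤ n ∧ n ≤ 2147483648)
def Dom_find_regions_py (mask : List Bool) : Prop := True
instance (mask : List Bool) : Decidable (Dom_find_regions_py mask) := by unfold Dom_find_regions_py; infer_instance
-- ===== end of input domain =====

-- B replaces A's in_region-flag element scan by a run-length grouping pass (alternative decomposition, same cost).

-- ===== PORT A =====
-- A's for-loop over enumerate(mask) with state (regions, in_region, start); i is the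
-- enumerate index, so at loop exit i = len(mask), which the final append uses.
def pvALoop (regions : List (Int × Int)) (in_region : Bool) (start : Int) (i : Int) :
    List Bool → List (Int × Int)
  | [] => if in_region then regions ++ [(start, i)] else regions
  | v :: rest =>
    if v && !in_region then pvALoop regions true i (i + 1) rest
    else if !v && in_region then pvALoop (regions ++ [(start, i)]) false start (i + 1) rest
    else pvALoop regions in_region start (i + 1) rest

def find_regions_py (mask : List Bool) : List (Int × Int) :=
  pvALoop [] false 0 0 mask

-- ===== PORT B =====
-- B's inner while loop: advance j over the maximal run of elements equal to key,
-- returning (run length, remainder).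
def pvTakeRun (key : Bool) : List Bool → Nat × List Bool
  | [] => (0, [])
  | x :: xs =>
    if x = key then
      let p := pvTakeRun key xs
      (p.1 + 1, p.2)
    else (0, x :: xs)

theorem pvTakeRun_len (key : Bool) : ∀ xs : List Bool, (pvTakeRun key xs).2.length ≤ xs.length
  | [] => le_refl _
  | x :: xs => by
    simp only [pvTakeRun]
    split
    · exact le_trans (pvTakeRun_len key xs) (Nat.le_succ _)
    · exact le_refl _

-- B's outer while loop: idx is the absolute index of the head of the remaining list.
def pvBLoop (idx : Int) : List Bool → List (Int × Int)
  | [] => []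
  | x :: xs =>
    let p := pvTakeRun x xs
    let len : Int := (p.1 : Int) + 1
    (if x then [(idx, idx + len)] else []) ++ pvBLoop (idx + len) p.2
termination_by l => l.length
decreasing_by
  simpa using Nat.lt_succ_of_le (pvTakeRun_len x xs)

def find_regions_py_alt (mask : List Bool) : List (Int × Int) :=
  pvBLoop 0 mask

-- ===== PRECONDITION & SPEC =====
def Spec_find_regions_py (mask : List Bool) (out : List (Int × Int)) : Prop := out = find_regions_py_alt mask
instance (mask : List Bool) (out : List (Int × Int)) : Decidable (Spec_find_regions_py mask out) := by unfold Spec_find_regions_py; infer_instance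

-- ===== CLAIM (what is proved, stated in full; the proofs are below) =====
def Claim_equal_find_regions_py : Prop := ∀ (mask : List Bool), Dom_find_regions_py mask → Spec_find_regions_py mask (find_regions_py mask)

-- ===== LEMMAS AND PROOFS =====

-- Step (equation) lemmas for the two loops.
theorem aloop_nil (rs : List (Int × Int)) (b : Bool) (s i : Int) :
    pvALoop rs b s i [] = if b then rs ++ [(s, i)] else rs := by
  cases b <;> rfl

theorem aloop_out_true (rs : List (Int × Int)) (s i : Int) (rest : List Bool) :
    pvALoop rs false s i (true :: rest) = pvALoop rs true i (i + 1) rest := by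
  simp [pvALoop]

theorem aloop_out_false (rs : List (Int × Int)) (s i : Int) (rest : List Bool) :
    pvALoop rs false s i (false :: rest) = pvALoop rs false s (i + 1) rest := by
  simp [pvALoop]

theorem aloop_in_true (rs : List (Int × Int)) (s i : Int) (rest : List Bool) :
    pvALoop rs true s i (true :: rest) = pvALoop rs true s (i + 1) rest := by
  simp [pvALoop]

theorem aloop_in_false (rs : List (Int × Int)) (s i : Int) (rest : List Bool) :
    pvALoop rs true s i (false :: rest) = pvALoop (rs ++ [(s, i)]) false s (i + 1) rest := by
  simp [pvALoop]

theorem bloop_nil (i : Int) : pvBLoop i [] = [] := by simp [pvBLoop]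

theorem bloop_true (i : Int) (xs : List Bool) :
    pvBLoop i (true :: xs)
      = (i, i + ((pvTakeRun true xs).1 : Int) + 1)
          :: pvBLoop (i + ((pvTakeRun true xs).1 : Int) + 1) (pvTakeRun true xs).2 := by
  rw [pvBLoop]
  have h : i + (((pvTakeRun true xs).1 : Int) + 1) = i + ((pvTakeRun true xs).1 : Int) + 1 := by ring
  simp [h]

theorem bloop_false (i : Int) (xs : List Bool) :
    pvBLoop i (false :: xs)
      = pvBLoop (i + ((pvTakeRun false xs).1 : Int) + 1) (pvTakeRun false xs).2 := by
  rw [pvBLoop]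
  have h : i + (((pvTakeRun false xs).1 : Int) + 1) = i + ((pvTakeRun false xs).1 : Int) + 1 := by ring
  simp [h]

-- Accumulator extraction for A's loop.
theorem pvALoop_acc : ∀ (mask : List Bool) (rs : List (Int × Int)) (b : Bool) (s i : Int),
    pvALoop rs b s i mask = rs ++ pvALoop [] b s i mask
  | [], rs, b, s, i => by
    rw [aloop_nil, aloop_nil]
    cases b <;> simp
  | v :: rest, rs, b, s, i => by
    cases v <;> cases b
    · rw [aloop_out_false, aloop_out_false]
      exact pvALoop_acc rest rs false s (i + 1)
    · rw [aloop_in_false, aloop_in_false, pvALoop_acc rest (rs ++ [(s, i)]),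
        pvALoop_acc rest ([] ++ [(s, i)])]
      simp
    · rw [aloop_out_true, aloop_out_true]
      exact pvALoop_acc rest rs true i (i + 1)
    · rw [aloop_in_true, aloop_in_true]
      exact pvALoop_acc rest rs true s (i + 1)

-- A falsy head only advances B's index: the false run is consumed either way.
theorem pvBLoop_false_cons (i : Int) (ys : List Bool) :
    pvBLoop i (false :: ys) = pvBLoop (i + 1) ys := by
  cases ys with
  | nil => rw [bloop_false]; simp [pvTakeRun]
  | cons y zs =>
    cases y with
    | false =>
      rw [bloop_false, bloop_false]
      have h : pvTakeRun false (false :: zs)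
          = ((pvTakeRun false zs).1 + 1, (pvTakeRun false zs).2) := by
        simp [pvTakeRun]
      rw [h]
      have h2 : i + (((pvTakeRun false zs).1 + 1 : Nat) : Int) + 1
          = i + 1 + ((pvTakeRun false zs).1 : Int) + 1 := by push_cast; ring
      rw [h2]
    | true =>
      rw [bloop_false]
      simp [pvTakeRun]

-- Joint invariant, by induction on a length bound n:
-- out of a region A's scan from index i equals B's run scan from i;
-- inside a region opened at `start`, A closes it at i + (length of the remaining true run).
theorem pvMain : ∀ (n : Nat) (mask : List Bool), mask.length ≤ n →
    (∀ (s i : Int), pvALoop [] false s i mask = pvBLoop i mask) ∧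
    (∀ (start i : Int), pvALoop [] true start i mask
        = (start, i + ((pvTakeRun true mask).1 : Int)) ::
            pvBLoop (i + ((pvTakeRun true mask).1 : Int)) (pvTakeRun true mask).2) := by
  intro n
  induction n with
  | zero =>
    intro mask h
    have : mask = [] := List.length_eq_zero_iff.mp (Nat.le_zero.mp h)
    subst this
    constructor
    · intro s i; rw [aloop_nil, bloop_nil]; simp
    · intro start i; rw [aloop_nil]; simp [pvTakeRun, bloop_nil]
  | succ n ih =>
    intro mask h
    cases mask with
    | nil =>
      constructor
      · intro s i; rw [aloop_nil, bloop_nil]; simp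
      · intro start i; rw [aloop_nil]; simp [pvTakeRun, bloop_nil]
    | cons v rest =>
      have hr : rest.length ≤ n := Nat.le_of_succ_le_succ h
      constructor
      · intro s i
        cases v with
        | true =>
          rw [aloop_out_true, (ih rest hr).2 i (i + 1), bloop_true]
          have h2 : i + 1 + ((pvTakeRun true rest).1 : Int)
              = i + ((pvTakeRun true rest).1 : Int) + 1 := by ring
          rw [h2]
        | false =>
          rw [aloop_out_false, (ih rest hr).1 s (i + 1), pvBLoop_false_cons]
      · intro start i
        cases v with
        | true =>
          rw [aloop_in_true, (ih rest hr).2 start (i + 1)]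
          have ht : pvTakeRun true (true :: rest)
              = ((pvTakeRun true rest).1 + 1, (pvTakeRun true rest).2) := by
            simp [pvTakeRun]
          rw [ht]
          have h2 : i + 1 + ((pvTakeRun true rest).1 : Int)
              = i + (((pvTakeRun true rest).1 + 1 : Nat) : Int) := by push_cast; ring
          rw [h2]
        | false =>
          rw [aloop_in_false, pvALoop_acc, (ih rest hr).1 start (i + 1)]
          have ht : pvTakeRun true (false :: rest) = (0, false :: rest) := by
            simp [pvTakeRun]
          rw [ht, pvBLoop_false_cons]
          simp

-- ===== VERDICT (by name: the statement is the Claim_ definition above) =====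
theorem find_regions_py_spec : Claim_equal_find_regions_py := by
  intro mask _
  unfold Spec_find_regions_py find_regions_py find_regions_py_alt
  exact (pvMain mask.length mask (le_refl _)).1 0 0
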